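-- pv_equiv track=rewrite | github.com/StefanPej/advent_of_code | 2023/day_12/attempt_3.py | find_placements
-- ===== SOURCE A (Python) =====
-- def find_placements(board):
--     ret = []
--     finding = False
--     for i, char in enumerate(board):
--         if char in ['?', '#']:
--             if not finding:
--                 finding = True
--                 start_ind = i
--         else:
--             if finding:
--                 ret.append((start_ind, i-1))
--                 finding = False
--     if finding:
--         ret.append((start_ind, len(board)-1))
--     return ret
-- ===== SOURCE B (Python) =====
-- def find_placements(board):
--     mask = [c in ('?', '#') for c in board]
--     starts = [i for i, (m, p) in enumerate(zip(mask, [False] + mask)) if m and not p]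
--     ends = [i for i, (m, x) in enumerate(zip(mask, mask[1:] + [False])) if m and not x]
--     return list(zip(starts, ends))
-- ===== Notes on version B (the rewrite author's own statement) =====
-- stated objective: alternative
-- what changed: Replaced A's finding-flag state machine with post-loop flush by three staged passes: build a boolean mask, detect run starts/ends by zipping the mask against its left/right shifts, and zip the starts list with the ends list.
import Mathlib
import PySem

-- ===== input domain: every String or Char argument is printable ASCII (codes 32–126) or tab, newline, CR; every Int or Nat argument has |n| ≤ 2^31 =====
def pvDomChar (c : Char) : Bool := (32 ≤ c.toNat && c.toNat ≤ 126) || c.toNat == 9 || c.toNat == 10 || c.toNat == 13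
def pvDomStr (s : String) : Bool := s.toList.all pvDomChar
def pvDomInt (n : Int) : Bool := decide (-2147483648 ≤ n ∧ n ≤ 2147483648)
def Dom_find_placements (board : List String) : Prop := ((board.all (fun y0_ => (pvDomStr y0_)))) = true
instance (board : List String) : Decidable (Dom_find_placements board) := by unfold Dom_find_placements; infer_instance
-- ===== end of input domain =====

-- B replaces A's finding-flag state machine by three staged passes: a boolean mask,
-- boundary detection by zipping the mask with its shifts, and zipping starts with ends.


-- ===== PORT A =====
-- loop over board with index i and state (finding, start_ind, ret); on exhaustion the
-- post-loop flush uses len(board)-1, passed in as n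
def goA (n : Int) : List String → Int → Bool → Int → List (Int × Int) → List (Int × Int)
  | [], _, finding, _start, ret =>
      if finding then ret ++ [(_start, n - 1)] else ret
  | c :: rest, i, finding, start_ind, ret =>
      if c = "?" ∨ c = "#" then
        if finding = false then goA n rest (i + 1) true i ret
        else goA n rest (i + 1) finding start_ind ret
      else
        if finding then goA n rest (i + 1) false start_ind (ret ++ [(start_ind, i - 1)])
        else goA n rest (i + 1) finding start_ind ret

def find_placements (board : List String) : List (Int × Int) :=
  goA (board.length : Int) board 0 false 0 []

-- ===== PORT B =====
-- mask = [c in ('?', '#') for c in board]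
def maskOf (board : List String) : List Bool :=
  board.map (fun c => decide (c = "?" ∨ c = "#"))

-- starts = [i for i, (m, p) in enumerate(zip(mask, [False] + mask)) if m and not p]
-- ends   = [i for i, (m, x) in enumerate(zip(mask, mask[1:] + [False])) if m and not x]
-- return list(zip(starts, ends))        (mask[1:] ported as List.drop 1, exact here)
def find_placements_alt (board : List String) : List (Int × Int) :=
  let mask := maskOf board
  let starts := ((PySem.List.enumerate (mask.zip (false :: mask)) 0).filter
      (fun p => p.2.1 && !p.2.2)).map (fun p => p.1)
  let ends := ((PySem.List.enumerate (mask.zip (mask.drop 1 ++ [false])) 0).filter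
      (fun p => p.2.1 && !p.2.2)).map (fun p => p.1)
  starts.zip ends

-- ===== PRECONDITION & SPEC =====
def Spec_find_placements (board : List String) (out : List (Int × Int)) : Prop := out = find_placements_alt board
instance (board : List String) (out : List (Int × Int)) : Decidable (Spec_find_placements board out) := by unfold Spec_find_placements; infer_instance

-- ===== CLAIM (what is proved, stated in full; the proofs are below) =====
def Claim_equal_find_placements : Prop := ∀ (board : List String), Dom_find_placements board → Spec_find_placements board (find_placements board)

-- ===== LEMMAS AND PROOFS =====

-- run starts of a mask, given the previous cell's value and the current index
def sB (prev : Bool) (i : Int) : List Bool → List Int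
  | [] => []
  | b :: t => (if b && !prev then [i] else []) ++ sB b (i + 1) t

-- run ends, previous-cell style: an end at i-1 whenever a run stops (or the list ends)
def eB (prev : Bool) (i : Int) : List Bool → List Int
  | [] => if prev then [i - 1] else []
  | b :: t => (if prev && !b then [i - 1] else []) ++ eB b (i + 1) t

-- run ends, lookahead style (as computed by B's `ends`)
def eL (i : Int) : List Bool → List Int
  | [] => []
  | b :: t => (if b && !(t.headD false) then [i] else []) ++ eL (i + 1) t

theorem starts_eq (mask : List Bool) : ∀ (prev : Bool) (i : Int),
    ((PySem.List.enumerate (mask.zip (prev :: mask)) i).filter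
      (fun p => p.2.1 && !p.2.2)).map (fun p => p.1) = sB prev i mask := by
  induction mask with
  | nil => intro prev i; simp [sB]
  | cons b t ih =>
      intro prev i
      simp only [List.zip_cons_cons, PySem.List.enumerate_cons, List.filter_cons]
      by_cases hb : (b && !prev) = true <;>
        simp [hb, sB, ih b (i + 1)]

theorem ends_eq (mask : List Bool) : ∀ (i : Int),
    ((PySem.List.enumerate (mask.zip (mask.drop 1 ++ [false])) i).filter
      (fun p => p.2.1 && !p.2.2)).map (fun p => p.1) = eL i mask := by
  induction mask with
  | nil => intro i; simp [eL]
  | cons b t ih =>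
      intro i
      have hd : (b :: t).drop 1 ++ [false] = t ++ [false] := by simp
      rw [hd]
      cases t with
      | nil =>
          by_cases hb : b = true <;>
            simp [hb, eL, PySem.List.enumerate_cons]
      | cons b2 t2 =>
          have hz : (b :: b2 :: t2).zip ((b2 :: t2) ++ [false])
              = (b, b2) :: (b2 :: t2).zip (t2 ++ [false]) := by simp
          have ih' := ih (i + 1)
          simp only [List.drop_succ_cons, List.drop_zero] at ih'
          rw [hz, PySem.List.enumerate_cons, List.filter_cons]
          by_cases hb : (b && !b2) = true <;>
            simp [hb, eL, ih']

theorem eB_eL (mask : List Bool) : ∀ (prev : Bool) (i : Int),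
    eB prev i mask = (if prev && !(mask.headD false) then [i - 1] else []) ++ eL i mask := by
  induction mask with
  | nil => intro prev i; by_cases hp : prev = true <;> simp [eB, eL, hp]
  | cons b t ih =>
      intro prev i
      simp only [eB, eL, List.headD_cons, ih b (i + 1)]
      by_cases hp : (prev && !b) = true <;> simp [hp]

-- main invariant: A's state machine produces the zip of starts and (prev-style) ends
theorem goA_inv : ∀ (rest : List String) (n i : Int), n = i + rest.length →
    (∀ (s : Int) (ret : List (Int × Int)),
      goA n rest i false s ret = ret ++ (sB false i (maskOf rest)).zip (eB false i (maskOf rest))) ∧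
    (∀ (s : Int) (ret : List (Int × Int)),
      goA n rest i true s ret = ret ++ (s :: sB true i (maskOf rest)).zip (eB true i (maskOf rest))) := by
  intro rest
  induction rest with
  | nil =>
      intro n i h
      constructor <;> intro s ret <;>
        simp [goA, maskOf, sB, eB, h]
  | cons c t ih =>
      intro n i h
      have h' : n = (i + 1) + t.length := by simp at h; omega
      have ihf := (ih n (i + 1) h').1
      have iht := (ih n (i + 1) h').2
      have hm : maskOf (c :: t) = (decide (c = "?" ∨ c = "#")) :: maskOf t := rfl
      by_cases hc : c = "?" ∨ c = "#"
      · constructor <;> intro s ret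
        · simp only [goA, iht i ret, hm, sB, eB, hc]
          simp
        · simp only [goA, iht s ret, hm, sB, eB, hc]
          simp
      · constructor <;> intro s ret
        · simp only [goA, ihf s ret, hm, sB, eB, hc]
          simp
        · simp only [goA, ihf s (ret ++ [(s, i - 1)]), hm, sB, eB, hc]
          simp

-- ===== VERDICT (by name: the statement is the Claim_ definition above) =====
theorem find_placements_spec : Claim_equal_find_placements := by
  intro board _
  unfold Spec_find_placements find_placements find_placements_alt
  rw [(goA_inv board (board.length : Int) 0 (by simp)).1 0 []]
  simp only [starts_eq, ends_eq]
  simp [eB_eL]
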